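-- pv_equiv track=rewrite | github.com/dsychoi/aoc2024 | day2/day2.py | is_safe_tolerant
-- ===== SOURCE A (Python) =====
-- def is_safe_tolerant(nums):
--     is_increasing = all(1 <= nums[i + 1] - nums[i] <= 3 for i in range(len(nums) - 1))
--     is_decreasing = all(1 <= nums[i] - nums[i + 1] <= 3 for i in range(len(nums) - 1))
--
--     if is_increasing or is_decreasing:
--         return True
--
--     for index, num in enumerate(nums):
--         nums_copy = nums.copy()
--         nums_copy.pop(index)
--         is_increasing = all(1 <= nums_copy[i + 1] - nums_copy[i] <= 3 for i in range(len(nums_copy) - 1))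
--         is_decreasing = all(1 <= nums_copy[i] - nums_copy[i + 1] <= 3 for i in range(len(nums_copy) - 1))
--         if is_increasing or is_decreasing:
--             return True
--     return False
-- ===== SOURCE B (Python) =====
-- def is_safe_tolerant(nums):
--     # Single pass per direction: scan to the first bad adjacent pair; only
--     # removing one of its two members can fix that direction, so test just those two.
--     def check(lo, hi):
--         def safe(xs):
--             return all(lo <= b - a <= hi for a, b in zip(xs, xs[1:]))
--         k = 0
--         while k + 1 < len(nums) and lo <= nums[k + 1] - nums[k] <= hi:
--             k += 1
--         if k + 1 >= len(nums):
--             return True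
--         return safe(nums[:k] + nums[k + 1:]) or safe(nums[:k + 1] + nums[k + 2:])
--     return check(1, 3) or check(-3, -1)
-- ===== Notes on version B (the rewrite author's own statement) =====
-- stated objective: faster
-- what changed: Instead of re-checking safety after removing every one of the n elements, B scans once per direction to the first out-of-range adjacent pair and tests only the two removals (either member of that pair) that could fix it.
import Mathlib
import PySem

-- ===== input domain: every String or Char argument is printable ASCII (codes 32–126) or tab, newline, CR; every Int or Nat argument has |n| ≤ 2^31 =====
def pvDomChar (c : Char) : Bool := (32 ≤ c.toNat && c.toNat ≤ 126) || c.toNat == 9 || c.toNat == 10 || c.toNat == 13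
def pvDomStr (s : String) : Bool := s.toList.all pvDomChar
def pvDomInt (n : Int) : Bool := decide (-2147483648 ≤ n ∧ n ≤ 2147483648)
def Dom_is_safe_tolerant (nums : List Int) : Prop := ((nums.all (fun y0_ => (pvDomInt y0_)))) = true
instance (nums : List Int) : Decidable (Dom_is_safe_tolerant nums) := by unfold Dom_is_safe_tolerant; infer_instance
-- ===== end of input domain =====

-- B replaces A's try-every-removal O(n^2) scan by one pass per direction to the
-- first bad adjacent pair, testing only the two removals that can fix it (faster).

-- ===== PORT A =====
-- A's generator `all(lo-style check for i in range(len(xs)-1))`, used four times in A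
def pvAllRangeA (xs : List Int) (Q : Int → Int → Bool) : Bool :=
  (PySem.List.pyRange 0 (PySem.List.len xs - 1) 1).all
    (fun i => Q (PySem.List.pyGetD xs i 0) (PySem.List.pyGetD xs (i + 1) 0))

def is_safe_tolerant (nums : List Int) : Bool :=
  let is_increasing := pvAllRangeA nums (fun a b => decide (1 ≤ b - a ∧ b - a ≤ 3))
  let is_decreasing := pvAllRangeA nums (fun a b => decide (1 ≤ a - b ∧ a - b ≤ 3))
  if is_increasing || is_decreasing then true
  else
    (PySem.List.enumerate nums 0).any (fun p =>
      match PySem.List.pop? nums p.1 with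
      | some (_, nums_copy) =>
          let inc2 := pvAllRangeA nums_copy (fun a b => decide (1 ≤ b - a ∧ b - a ≤ 3))
          let dec2 := pvAllRangeA nums_copy (fun a b => decide (1 ≤ a - b ∧ a - b ≤ 3))
          inc2 || dec2
      | none => false)

-- ===== PORT B =====
-- Source B's `safe(xs)`: all pairs of zip(xs, xs[1:]) within [lo, hi]
def pvSafeB (lo hi : Int) (xs : List Int) : Bool :=
  (xs.zip (PySem.List.slice xs (some 1) none)).all
    (fun p => decide (lo ≤ p.2 - p.1 ∧ p.2 - p.1 ≤ hi))

-- Source B's while loop: advance k while the adjacent pair at k is within [lo, hi]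
def pvFindB (lo hi : Int) (nums : List Int) (k : Nat) : Nat :=
  if k + 1 < nums.length ∧
      (lo ≤ nums.getD (k + 1) 0 - nums.getD k 0 ∧ nums.getD (k + 1) 0 - nums.getD k 0 ≤ hi) then
    pvFindB lo hi nums (k + 1)
  else k
termination_by nums.length - k
decreasing_by omega

-- Source B's `check(lo, hi)`
def pvCheckB (lo hi : Int) (nums : List Int) : Bool :=
  let k := pvFindB lo hi nums 0
  if nums.length ≤ k + 1 then true
  else
    pvSafeB lo hi (PySem.List.slice nums none (some (k : Int)) ++
                   PySem.List.slice nums (some ((k : Int) + 1)) none) ||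
    pvSafeB lo hi (PySem.List.slice nums none (some ((k : Int) + 1)) ++
                   PySem.List.slice nums (some ((k : Int) + 2)) none)

def is_safe_tolerant_alt (nums : List Int) : Bool :=
  pvCheckB 1 3 nums || pvCheckB (-3) (-1) nums

-- ===== PRECONDITION & SPEC =====
def Spec_is_safe_tolerant (nums : List Int) (out : Bool) : Prop := out = is_safe_tolerant_alt nums
instance (nums : List Int) (out : Bool) : Decidable (Spec_is_safe_tolerant nums out) := by unfold Spec_is_safe_tolerant; infer_instance

-- ===== CLAIM (what is proved, stated in full; the proofs are below) =====
def Claim_equal_is_safe_tolerant : Prop := ∀ (nums : List Int), Dom_is_safe_tolerant nums → Spec_is_safe_tolerant nums (is_safe_tolerant nums)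

-- ===== LEMMAS AND PROOFS =====

-- adjacent-pair condition, safety and one-removal tolerance, index form
def pvRP (lo hi a b : Int) : Prop := lo ≤ b - a ∧ b - a ≤ hi

def pvSafeP (lo hi : Int) (xs : List Int) : Prop :=
  ∀ k (h : k + 1 < xs.length), pvRP lo hi (xs[k]'(by omega)) (xs[k + 1]'h)

def pvTolP (lo hi : Int) (xs : List Int) : Prop :=
  pvSafeP lo hi xs ∨ ∃ k, k < xs.length ∧ pvSafeP lo hi (xs.eraseIdx k)

theorem pvAllRangeA_iff (xs : List Int) (Q : Int → Int → Bool) :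
    pvAllRangeA xs Q = true ↔
      ∀ k (h : k + 1 < xs.length), Q (xs[k]'(by omega)) (xs[k + 1]'h) = true := by
  unfold pvAllRangeA
  rw [List.all_eq_true]
  constructor
  · intro H k h
    have hm : ((k : Nat) : Int) ∈ PySem.List.pyRange 0 (PySem.List.len xs - 1) 1 := by
      rw [PySem.List.mem_pyRange_one]
      simp only [PySem.List.len_eq]
      omega
    have hv := H _ hm
    have hc : ((k : Nat) : Int) + 1 = (((k + 1 : Nat)) : Int) := by push_cast; ring
    rw [hc] at hv
    simp only [PySem.List.pyGetD_natCast] at hv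
    rwa [List.getD_eq_getElem xs 0 (by omega), List.getD_eq_getElem xs 0 h] at hv
  · intro H i hi
    rw [PySem.List.mem_pyRange_one] at hi
    simp only [PySem.List.len_eq] at hi
    obtain ⟨h0, hlt⟩ := hi
    have hk : i = ((i.toNat : Nat) : Int) := by omega
    have hb : i.toNat + 1 < xs.length := by omega
    have hc : ((i.toNat : Nat) : Int) + 1 = (((i.toNat + 1 : Nat)) : Int) := by push_cast; ring
    rw [hk, hc]
    simp only [PySem.List.pyGetD_natCast]
    rw [List.getD_eq_getElem xs 0 (by omega), List.getD_eq_getElem xs 0 hb]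
    exact H i.toNat hb

theorem pvSafeB_iff (lo hi : Int) (xs : List Int) :
    pvSafeB lo hi xs = true ↔ pvSafeP lo hi xs := by
  unfold pvSafeB
  rw [PySem.List.slice_from_one]
  induction xs with
  | nil =>
      constructor
      · intro _ k h; simp at h
      · intro _; rfl
  | cons a tl ih =>
      cases tl with
      | nil =>
          constructor
          · intro _ k h; simp at h
          · intro _; rfl
      | cons b t =>
          simp only [List.tail_cons] at ih ⊢
          simp only [List.zip_cons_cons, List.all_cons, Bool.and_eq_true, decide_eq_true_eq]
          rw [ih]
          constructor
          · rintro ⟨h1, h2⟩ k hk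
            match k with
            | 0 => exact h1
            | (k + 1) =>
                exact h2 k (by simpa using hk)
          · intro H
            refine ⟨H 0 (by simp), ?_⟩
            intro k hk
            exact H (k + 1) (by simp at hk ⊢; omega)

theorem pvFindB_spec (lo hi : Int) (nums : List Int) (k : Nat) :
    k ≤ pvFindB lo hi nums k
    ∧ (∀ m, k ≤ m → m < pvFindB lo hi nums k →
        m + 1 < nums.length ∧ pvRP lo hi (nums.getD m 0) (nums.getD (m + 1) 0))
    ∧ ¬(pvFindB lo hi nums k + 1 < nums.length ∧
        pvRP lo hi (nums.getD (pvFindB lo hi nums k) 0) (nums.getD (pvFindB lo hi nums k + 1) 0)) := by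
  rw [pvFindB]
  split
  · rename_i h
    have ih := pvFindB_spec lo hi nums (k + 1)
    refine ⟨by omega, ?_, ih.2.2⟩
    intro m hm hm2
    rcases Nat.eq_or_lt_of_le hm with rfl | hlt
    · exact ⟨h.1, h.2⟩
    · exact ih.2.1 m (by omega) hm2
  · rename_i h
    exact ⟨Nat.le_refl _, by intro m hm hm2; omega, h⟩
termination_by nums.length - k
decreasing_by rename_i h _; omega

theorem pvNotSafe_erase (lo hi : Int) (nums : List Int) (j k : Nat)
    (hj : j + 1 < nums.length)
    (hbad : ¬ pvRP lo hi (nums[j]'(by omega)) (nums[j + 1]'hj))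
    (hk : k < nums.length) (h1 : k ≠ j) (h2 : k ≠ j + 1) :
    ¬ pvSafeP lo hi (nums.eraseIdx k) := by
  intro HS
  have hlen : (nums.eraseIdx k).length = nums.length - 1 := by
    rw [List.length_eraseIdx]; simp [hk]
  rcases Nat.lt_or_ge k j with hlt | hge
  · obtain ⟨i, rfl⟩ : ∃ i, j = i + 1 := ⟨j - 1, by omega⟩
    have hb : i + 1 < (nums.eraseIdx k).length := by omega
    have hp := HS i hb
    rw [List.getElem_eraseIdx, List.getElem_eraseIdx] at hp
    split at hp
    · omega
    · split at hp
      · omega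
      · exact hbad hp
  · have hge2 : j + 2 ≤ k := by omega
    have hb : j + 1 < (nums.eraseIdx k).length := by omega
    have hp := HS j hb
    rw [List.getElem_eraseIdx, List.getElem_eraseIdx] at hp
    split at hp
    · split at hp
      · exact hbad hp
      · omega
    · omega

theorem pvCheckB_iff (lo hi : Int) (nums : List Int) :
    pvCheckB lo hi nums = true ↔ pvTolP lo hi nums := by
  unfold pvCheckB
  obtain ⟨-, hgood, hstop⟩ := pvFindB_spec lo hi nums 0
  set j := pvFindB lo hi nums 0 with hjdef
  by_cases hlen : nums.length ≤ j + 1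
  · rw [if_pos hlen]
    have hsafe : pvSafeP lo hi nums := by
      intro m hm
      have := hgood m (Nat.zero_le m) (by omega)
      rw [List.getD_eq_getElem nums 0 (by omega), List.getD_eq_getElem nums 0 hm] at this
      exact this.2
    simp only [true_iff]
    exact Or.inl hsafe
  · rw [if_neg hlen]
    have hj1 : j + 1 < nums.length := by omega
    have hbad : ¬ pvRP lo hi (nums[j]'(by omega)) (nums[j + 1]'hj1) := by
      intro hr
      exact hstop ⟨hj1, by
        rw [List.getD_eq_getElem nums 0 (by omega), List.getD_eq_getElem nums 0 hj1]; exact hr⟩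
    have hc1 : ((j : Nat) : Int) + 1 = (((j + 1 : Nat)) : Int) := by push_cast; ring
    have hc2 : ((j : Nat) : Int) + 2 = (((j + 2 : Nat)) : Int) := by push_cast; ring
    rw [hc1, hc2, PySem.List.slice_to_natCast, PySem.List.slice_to_natCast,
        PySem.List.slice_from_natCast, PySem.List.slice_from_natCast,
        ← List.eraseIdx_eq_take_drop_succ, ← List.eraseIdx_eq_take_drop_succ]
    rw [Bool.or_eq_true, pvSafeB_iff, pvSafeB_iff]
    constructor
    · rintro (h | h)
      · exact Or.inr ⟨j, by omega, h⟩
      · exact Or.inr ⟨j + 1, by omega, h⟩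
    · rintro (h | ⟨k, hk, hks⟩)
      · exact absurd (h j hj1) hbad
      · by_cases e1 : k = j
        · exact Or.inl (e1 ▸ hks)
        · by_cases e2 : k = j + 1
          · exact Or.inr (e2 ▸ hks)
          · exact absurd hks (pvNotSafe_erase lo hi nums j k hj1 hbad hk e1 e2)

theorem pvInc_iff (xs : List Int) :
    pvAllRangeA xs (fun a b => decide (1 ≤ b - a ∧ b - a ≤ 3)) = true ↔ pvSafeP 1 3 xs := by
  rw [pvAllRangeA_iff]
  unfold pvSafeP pvRP
  constructor <;> intro H k h <;> have := H k h <;> simp only [decide_eq_true_eq] at * <;> omega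

theorem pvDec_iff (xs : List Int) :
    pvAllRangeA xs (fun a b => decide (1 ≤ a - b ∧ a - b ≤ 3)) = true ↔ pvSafeP (-3) (-1) xs := by
  rw [pvAllRangeA_iff]
  unfold pvSafeP pvRP
  constructor <;> intro H k h <;> have := H k h <;> simp only [decide_eq_true_eq] at * <;> omega

theorem pvA_iff (nums : List Int) :
    is_safe_tolerant nums = true ↔ (pvTolP 1 3 nums ∨ pvTolP (-3) (-1) nums) := by
  have hA : is_safe_tolerant nums =
      (if (pvAllRangeA nums (fun a b => decide (1 ≤ b - a ∧ b - a ≤ 3)) ||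
           pvAllRangeA nums (fun a b => decide (1 ≤ a - b ∧ a - b ≤ 3))) = true then true
       else
         (PySem.List.enumerate nums 0).any (fun p =>
           match PySem.List.pop? nums p.1 with
           | some (_, nums_copy) =>
               (pvAllRangeA nums_copy (fun a b => decide (1 ≤ b - a ∧ b - a ≤ 3)) ||
                pvAllRangeA nums_copy (fun a b => decide (1 ≤ a - b ∧ a - b ≤ 3)))
           | none => false)) := rfl
  rw [hA]
  cases htop : (pvAllRangeA nums (fun a b => decide (1 ≤ b - a ∧ b - a ≤ 3)) ||
      pvAllRangeA nums (fun a b => decide (1 ≤ a - b ∧ a - b ≤ 3))) with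
  | true =>
    rw [if_pos rfl]
    rw [Bool.or_eq_true, pvInc_iff, pvDec_iff] at htop
    simp only [true_iff]
    rcases htop with h | h
    · exact Or.inl (Or.inl h)
    · exact Or.inr (Or.inl h)
  | false =>
    rw [if_neg (by simp)]
    rw [Bool.or_eq_false_iff] at htop
    have hni : ¬ pvSafeP 1 3 nums := by rw [← pvInc_iff, htop.1]; simp
    have hnd : ¬ pvSafeP (-3) (-1) nums := by rw [← pvDec_iff, htop.2]; simp
    have htop' : ¬ pvSafeP 1 3 nums ∧ ¬ pvSafeP (-3) (-1) nums := ⟨hni, hnd⟩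
    rw [List.any_eq_true]
    constructor
    · rintro ⟨p, hp, hf⟩
      rw [PySem.List.mem_enumerate_iff] at hp
      obtain ⟨k, hk, rfl⟩ := hp
      simp only [zero_add] at hf
      rw [PySem.List.pop?_natCast nums k hk] at hf
      simp only [Bool.or_eq_true, pvInc_iff, pvDec_iff] at hf
      rcases hf with h | h
      · exact Or.inl (Or.inr ⟨k, hk, h⟩)
      · exact Or.inr (Or.inr ⟨k, hk, h⟩)
    · rintro (h | h) <;> rcases h with h | ⟨k, hk, hks⟩
      · exact absurd h htop'.1
      · refine ⟨((k : Int), nums[k]'hk), (PySem.List.mem_enumerate_iff _ _ _).mpr ⟨k, hk, by simp⟩, ?_⟩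
        rw [PySem.List.pop?_natCast nums k hk]
        simp only [Bool.or_eq_true, pvInc_iff, pvDec_iff]
        exact Or.inl hks
      · exact absurd h htop'.2
      · refine ⟨((k : Int), nums[k]'hk), (PySem.List.mem_enumerate_iff _ _ _).mpr ⟨k, hk, by simp⟩, ?_⟩
        rw [PySem.List.pop?_natCast nums k hk]
        simp only [Bool.or_eq_true, pvInc_iff, pvDec_iff]
        exact Or.inr hks

theorem pvB_iff (nums : List Int) :
    is_safe_tolerant_alt nums = true ↔ (pvTolP 1 3 nums ∨ pvTolP (-3) (-1) nums) := by
  unfold is_safe_tolerant_alt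
  rw [Bool.or_eq_true, pvCheckB_iff, pvCheckB_iff]

-- ===== VERDICT (by name: the statement is the Claim_ definition above) =====
theorem is_safe_tolerant_spec : Claim_equal_is_safe_tolerant := by
  intro nums _
  unfold Spec_is_safe_tolerant
  have hA := pvA_iff nums
  have hB := pvB_iff nums
  cases hA' : is_safe_tolerant nums <;> cases hB' : is_safe_tolerant_alt nums <;>
    simp_all
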